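-- pv_equiv track=rewrite | github.com/Tongky-HGU/Algorithm | 대회,기출/카카오_2021_신규아이디추천.py | solution
-- ===== SOURCE A (Python) =====
-- def solution(new_id):
--     check = ['-','_','.']
--
--     #1
--     new_id = new_id.lower()
--
--     #2
--     temp = []
--     for char in new_id:
--         for i in check:
--             if char == i:
--                 temp.append(char)
--                 break
--         if char.isalpha() or char.isdigit():
--             temp.append(char)
--     new_id = ''.join(temp)
--
--     #3
--     temp =[]
--     flag = 0
--     for char in new_id:
--         if char == '.':
--             if flag == 0:
--                 temp.append(char)
--                 flag = 1
--         else: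
--             temp.append(char)
--             flag = 0
--
--     #4
--     if len(temp) > 0 and temp[0] == '.':
--         del temp[0]
--     if len(temp) and temp[-1] == '.':
--         del temp[-1]
--
--     #5
--     if len(temp) == 0:
--         temp.append('a')
--
--     #6
--     if len(temp) >= 16:
--         temp= temp[:15]
--         if temp[-1] == '.':
--             del temp[-1]
--     # #7
--     elif len(temp) < 3:
--         while(len(temp) < 3):
--             temp.append(temp[-1])
--
--     return ''.join(temp)
-- ===== SOURCE B (Python) =====
-- def solution(new_id):
--     kept = ''.join(c for c in new_id.lower() if c.isalnum() or c in '-_.')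
--     s = '.'.join(p for p in kept.split('.') if p)
--     if not s:
--         s = 'a'
--     if len(s) >= 16:
--         s = s[:15]
--         if s.endswith('.'):
--             s = s[:-1]
--     elif len(s) < 3:
--         s += s[-1] * (3 - len(s))
--     return s
-- ===== Notes on version B (the rewrite author's own statement) =====
-- stated objective: idiomatic
-- what changed: Replaces A's nested membership loop and flag-stateful dot-collapsing loop with a comprehension filter plus a split/filter/join pipeline, and the manual boundary-dot deletions and while-padding with slicing, endswith and string repetition.
import Mathlib
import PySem

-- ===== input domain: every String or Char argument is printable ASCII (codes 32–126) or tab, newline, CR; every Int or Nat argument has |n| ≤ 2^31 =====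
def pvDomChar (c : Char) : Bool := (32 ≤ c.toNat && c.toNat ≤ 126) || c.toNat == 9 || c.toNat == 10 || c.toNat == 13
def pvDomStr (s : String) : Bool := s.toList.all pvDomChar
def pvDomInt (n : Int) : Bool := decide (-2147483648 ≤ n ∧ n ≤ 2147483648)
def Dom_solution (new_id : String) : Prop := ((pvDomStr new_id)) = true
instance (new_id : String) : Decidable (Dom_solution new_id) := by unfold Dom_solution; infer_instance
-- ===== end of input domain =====

-- B replaces A's flag-loop dot collapse and manual edge deletions by split/filter/join and slicing (idiomatic; a timing run measured it faster by a constant factor).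

-- ===== PORT A =====
-- Python: while len(temp) < 3: temp.append(temp[-1])
def padA (temp : List Char) : List Char :=
  if temp.length < 3 then padA (temp ++ [temp.getLast!]) else temp
termination_by 3 - temp.length
decreasing_by simp; omega

def solution (new_id : String) : String :=
  let check : List Char := ['-', '_', '.']
  let s1 := PySem.Chars.lower new_id.toList
  let temp2 := s1.foldl (fun temp char =>
    let temp := if check.contains char then temp ++ [char] else temp
    if PySem.Chars.isalpha char || PySem.Chars.isdigit char then temp ++ [char] else temp) []
  let st := temp2.foldl (fun (p : List Char × Int) char =>
    if char = '.' then
      (if p.2 = 0 then (p.1 ++ [char], 1) else p)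
    else (p.1 ++ [char], 0)) ([], 0)
  let t3 := st.1
  let t4 := if t3.length > 0 ∧ t3.head? = some '.' then t3.tail else t3
  let t5 := if t4.length ≠ 0 ∧ t4.getLast? = some '.' then t4.dropLast else t4
  let t6 := if t5.length = 0 then t5 ++ ['a'] else t5
  if t6.length ≥ 16 then
    let t7 := PySem.List.slice t6 none (some 15)
    let t8 := if t7.getLast? = some '.' then t7.dropLast else t7
    String.mk t8
  else if t6.length < 3 then String.mk (padA t6)
  else String.mk t6

-- ===== PORT B =====
def solution_alt (new_id : String) : String :=
  let kept := (PySem.Chars.lower new_id.toList).filter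
      (fun c => PySem.Chars.isalnum c || PySem.Chars.isIn [c] ['-', '_', '.'])
  let s := PySem.Chars.join ['.'] ((PySem.Chars.splitOn kept ['.']).filter (fun p => p ≠ []))
  let s := if s = [] then ['a'] else s
  if s.length ≥ 16 then
    let t := PySem.Chars.slice s none (some 15)
    if PySem.Chars.endswith t ['.'] then String.mk (PySem.Chars.slice t none (some (-1))) else String.mk t
  else if s.length < 3 then String.mk (s ++ List.replicate (3 - s.length) s.getLast!)
  else String.mk s

-- ===== PRECONDITION & SPEC =====
def Spec_solution (new_id : String) (out : String) : Prop := out = solution_alt new_id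
instance (new_id : String) (out : String) : Decidable (Spec_solution new_id out) := by unfold Spec_solution; infer_instance

-- ===== CLAIM (what is proved, stated in full; the proofs are below) =====
def Claim_equal_solution : Prop := ∀ (new_id : String), Dom_solution new_id → Spec_solution new_id (solution new_id)

-- ===== LEMMAS AND PROOFS =====

def spD : List Char → List (List Char)
  | [] => [[]]
  | c :: xs => if c = '.' then [] :: spD xs else (spD xs).modifyHead (c :: ·)

theorem spD_ne_nil (l : List Char) : spD l ≠ [] := by
  cases l with
  | nil => simp [spD]
  | cons c xs =>
    simp only [spD]
    split
    · simp
    · cases h : spD xs with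
      | nil => exact absurd h (spD_ne_nil xs)
      | cons a t => simp [List.modifyHead]

theorem go_eq (l : List Char) : ∀ (fuel : Nat) (cur : List Char) (acc : List (List Char)),
    l.length < fuel →
    PySem.Chars.splitOn.go ['.'] fuel l cur acc = acc.reverse ++ (spD l).modifyHead (cur.reverse ++ ·) := by
  induction l with
  | nil =>
    intro fuel cur acc h
    match fuel with
    | f + 1 => simp [PySem.Chars.splitOn.go, spD]
  | cons c xs ih =>
    intro fuel cur acc h
    match fuel with
    | f + 1 =>
      by_cases hc : c = '.'
      · subst hc
        have hpre : (['.'] : List Char).isPrefixOf ('.' :: xs) = true := by simp [List.isPrefixOf]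
        simp only [PySem.Chars.splitOn.go, hpre, if_pos, List.length_cons, List.length_nil,
          List.drop_succ_cons, List.drop_zero] at *
        rw [ih f [] (cur.reverse :: acc) (by omega)]
        cases hs : spD xs with
        | nil => exact absurd hs (spD_ne_nil xs)
        | cons a t => simp [spD, List.modifyHead, hs]
      · have hpre : (['.'] : List Char).isPrefixOf (c :: xs) = false := by
          simp [List.isPrefixOf]; exact fun h => absurd h.symm hc
        simp only [PySem.Chars.splitOn.go, hpre] at *
        rw [ih f (c :: cur) acc (by simp at h; omega)]
        simp only [spD, if_neg hc]
        cases hs : spD xs with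
        | nil => exact absurd hs (spD_ne_nil xs)
        | cons a t => simp [List.modifyHead]

theorem splitOn_eq_spD (l : List Char) : PySem.Chars.splitOn l ['.'] = spD l := by
  rw [PySem.Chars.splitOn, go_eq l (l.length + 1) [] [] (by omega)]
  cases h : spD l with
  | nil => exact absurd h (spD_ne_nil l)
  | cons a t => simp [List.modifyHead]

def rec3 : Bool → List Char → List Char
  | _, [] => []
  | flag, c :: xs =>
    if c = '.' then (if flag then rec3 true xs else '.' :: rec3 true xs)
    else c :: rec3 false xs

theorem rec3_true (xs : List Char) :
    rec3 true xs = rec3 false (xs.dropWhile (fun c => c == '.')) := by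
  induction xs with
  | nil => rfl
  | cons c t ih =>
    by_cases hc : c = '.'
    · subst hc; simpa [rec3, List.dropWhile] using ih
    · have hb : (c == '.') = false := by simp [hc]
      simp [rec3, List.dropWhile, hb, hc]

theorem foldl3_eq (l : List Char) : ∀ (acc : List Char) (flag : Int),
    (l.foldl (fun (p : List Char × Int) char =>
      if char = '.' then (if p.2 = 0 then (p.1 ++ [char], 1) else p)
      else (p.1 ++ [char], 0)) (acc, flag)).1 = acc ++ rec3 (decide (flag ≠ 0)) l := by
  induction l with
  | nil => intro acc flag; simp [rec3]
  | cons c t ih =>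
    intro acc flag
    by_cases hc : c = '.'
    · subst hc
      by_cases hf : flag = 0
      · subst hf; simp [List.foldl_cons, ih, rec3]
      · simp [List.foldl_cons, hf, ih, rec3]
    · simp [List.foldl_cons, hc, ih, rec3]

theorem rec3_append (p m : List Char) (hp : ∀ c ∈ p, c ≠ '.') :
    rec3 false (p ++ m) = p ++ rec3 false m := by
  induction p with
  | nil => rfl
  | cons c t ih =>
    have hc : c ≠ '.' := hp c (by simp)
    simp [rec3, hc, ih (fun d hd => hp d (by simp [hd]))]

theorem spD_append (p m : List Char) (hp : ∀ c ∈ p, c ≠ '.') :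
    spD (p ++ m) = (spD m).modifyHead (p ++ ·) := by
  induction p with
  | nil =>
    cases h : spD m with
    | nil => exact absurd h (spD_ne_nil m)
    | cons a t => simp [List.modifyHead, h]
  | cons c t ih =>
    have hc : c ≠ '.' := hp c (by simp)
    rw [List.cons_append, spD, if_neg hc, ih (fun d hd => hp d (by simp [hd]))]
    cases h : spD m with
    | nil => exact absurd h (spD_ne_nil m)
    | cons a u => simp [List.modifyHead]

theorem spD_filter_dropWhile (l : List Char) :
    ((spD (l.dropWhile (fun c => c == '.'))).filter (fun p => p ≠ [])) =
      (spD l).filter (fun p => p ≠ []) := by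
  induction l with
  | nil => rfl
  | cons c t ih =>
    by_cases hc : c = '.'
    · subst hc; simpa [spD, List.dropWhile] using ih
    · have hb : (c == '.') = false := by simp [hc]
      simp [List.dropWhile, hb]

theorem spD_filter_nil (l : List Char) (h : l.dropWhile (fun c => c == '.') = []) :
    (spD l).filter (fun p => p ≠ []) = [] := by
  rw [← spD_filter_dropWhile, h]; rfl

def delL (t : List Char) : List Char := if t.head? = some '.' then t.tail else t
def delT (t : List Char) : List Char := if t.getLast? = some '.' then t.dropLast else t

theorem delL_of_head (t : List Char) (h : t.head? ≠ some '.') : delL t = t := if_neg h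

theorem rec3_head (m : List Char) (h : m.head? ≠ some '.') :
    (rec3 false m).head? ≠ some '.' := by
  cases m with
  | nil => simp [rec3]
  | cons d xs =>
    have hd : d ≠ '.' := by simpa using h
    simp [rec3, hd]

theorem delT_dotfree (p : List Char) (hp : ∀ c ∈ p, c ≠ '.') : delT p = p := by
  unfold delT
  cases h : p.getLast? with
  | none => simp
  | some x =>
    have : x ≠ '.' := hp x (List.mem_of_getLast? h)
    simp [this]

theorem getLast?_cons_ne (t : List Char) (c : Char) (h : t ≠ []) :
    (c :: t).getLast? = t.getLast? := by
  cases t with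
  | nil => exact absurd rfl h
  | cons d ts => simp

theorem delT_append_cons (p t : List Char) (h : t ≠ []) :
    delT (p ++ '.' :: t) = p ++ '.' :: delT t := by
  unfold delT
  have h1 : (p ++ '.' :: t).getLast? = t.getLast? := by
    rw [List.getLast?_append_cons, getLast?_cons_ne t '.' h]
  rw [h1]
  split
  · rw [List.dropLast_append_cons, List.dropLast_cons_of_ne_nil h]
  · rfl

theorem filter_spD_cons_ne (d : Char) (xs : List Char) (hd : d ≠ '.') :
    (spD (d :: xs)).filter (fun p => p ≠ []) ≠ [] := by
  rw [spD, if_neg hd]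
  cases h : spD xs with
  | nil => exact absurd h (spD_ne_nil xs)
  | cons a t => simp [List.modifyHead]

theorem main_lemma : ∀ (n : Nat) (l : List Char), l.length ≤ n →
    delT (delL (rec3 false l)) =
      PySem.Chars.join ['.'] ((spD l).filter (fun p => p ≠ [])) := by
  intro n
  induction n with
  | zero =>
    intro l h
    have : l = [] := List.eq_nil_of_length_eq_zero (Nat.le_zero.mp h)
    subst this
    simp [rec3, delL, delT, spD, PySem.Chars.join, List.intercalate]
  | succ n ih =>
    intro l hlen
    cases l with
    | nil => simp [rec3, delL, delT, spD, PySem.Chars.join, List.intercalate]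
    | cons c xs =>
      by_cases hc : c = '.'
      · -- leading dot: strip it; both sides reduce to dropWhile
        subst hc
        have hml : (xs.dropWhile (fun c => c == '.')).length ≤ n := by
          have := List.length_dropWhile_le (fun c => c == '.') xs
          simp at hlen; omega
        have hstep : rec3 false ('.' :: xs) = '.' :: rec3 false (xs.dropWhile (fun c => c == '.')) := by
          simp [rec3, rec3_true]
        have hmh : (xs.dropWhile (fun c => c == '.')).head? ≠ some '.' := by
          cases h : xs.dropWhile (fun c => c == '.') with
          | nil => simp
          | cons d ds =>
            have h2 := List.head?_dropWhile_not (fun c => c == '.') xs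
            rw [h] at h2
            simpa using h2
        rw [hstep]
        have hdl : delL ('.' :: rec3 false (xs.dropWhile (fun c => c == '.'))) =
            rec3 false (xs.dropWhile (fun c => c == '.')) := by simp [delL]
        rw [hdl, ← delL_of_head _ (rec3_head _ hmh), ih _ hml]
        have hsp : (spD ('.' :: xs)).filter (fun p => p ≠ []) = (spD xs).filter (fun p => p ≠ []) := by
          simp [spD]
        rw [spD_filter_dropWhile, hsp]
      · -- leading non-dot: peel the first dot-free block p
        obtain ⟨p, r, hsplit, hpfree, hpne, hrprop⟩ :
            ∃ p r, p ++ r = c :: xs ∧ (∀ ch ∈ p, ch ≠ '.') ∧ p ≠ [] ∧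
              (r = [] ∨ ∃ r', r = '.' :: r') := by
          refine ⟨(c :: xs).takeWhile (fun ch => !(ch == '.')),
                  (c :: xs).dropWhile (fun ch => !(ch == '.')),
                  List.takeWhile_append_dropWhile, ?_, ?_, ?_⟩
          · intro ch hch
            have := List.mem_takeWhile_imp hch
            simpa using this
          · have hb : (c == '.') = false := by simp [hc]
            simp [List.takeWhile, hb]
          · cases h : (c :: xs).dropWhile (fun ch => !(ch == '.')) with
            | nil => exact Or.inl rfl
            | cons rh r' =>
              right
              have h2 := List.head?_dropWhile_not (fun ch => !(ch == '.')) (c :: xs)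
              rw [h] at h2
              simp at h2
              exact ⟨r', by rw [h2]⟩
        have hrec : rec3 false (c :: xs) = p ++ rec3 false r := by
          rw [← hsplit, rec3_append p r hpfree]
        have hspd : spD (c :: xs) = (spD r).modifyHead (p ++ ·) := by
          rw [← hsplit, spD_append p r hpfree]
        have hLhead : (p ++ rec3 false r).head? ≠ some '.' := by
          cases hpp : p with
          | nil => exact absurd hpp hpne
          | cons a as =>
            have : a ≠ '.' := hpfree a (by simp [hpp])
            simp [this]
        rw [hrec, delL_of_head _ hLhead]
        rcases hrprop with hrr | ⟨r', hrr⟩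
        · -- l = p, dot-free
          subst hrr
          have h0 : rec3 false ([] : List Char) = [] := rfl
          rw [h0, List.append_nil, hspd]
          have hsp0 : spD ([] : List Char) = [[]] := rfl
          rw [hsp0]
          simp only [List.modifyHead, List.append_nil]
          rw [delT_dotfree p hpfree]
          simp [List.filter, hpne, PySem.Chars.join, List.intercalate]
        · subst hrr
          have hspd2 : spD (c :: xs) = p :: spD r' := by
            rw [hspd, spD, if_pos rfl]
            cases h2 : spD r' with
            | nil => exact absurd h2 (spD_ne_nil r')
            | cons a t => simp [List.modifyHead]
          have hml : (r'.dropWhile (fun ch => ch == '.')).length ≤ n := by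
            have h1 := List.length_dropWhile_le (fun ch => ch == '.') r'
            have h2 : ('.' :: r').length ≤ (c :: xs).length := by
              rw [← hsplit, List.length_append]
              omega
            simp at h1 h2 hlen
            omega
          have hstep : rec3 false ('.' :: r') = '.' :: rec3 false (r'.dropWhile (fun ch => ch == '.')) := by
            simp [rec3, rec3_true]
          rw [hstep, hspd2]
          cases hmm : r'.dropWhile (fun ch => ch == '.') with
          | nil =>
            -- trailing dots only: rec3 part empty, RHS filter of spD r' empty
            have hfil : (spD r').filter (fun q => q ≠ []) = [] := spD_filter_nil r' hmm
            have hdt : delT (p ++ ['.']) = p := by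
              unfold delT
              rw [List.getLast?_append_cons]
              simp
            have hshape : ('.' :: rec3 false ([] : List Char)) = ['.'] := rfl
            rw [hshape, hdt]
            simp only [ne_eq, decide_not] at hfil
            simp [hpne, PySem.Chars.join, List.intercalate, hfil]
          | cons d ds =>
            have hdne : d ≠ '.' := by
              have h2 := List.head?_dropWhile_not (fun ch => ch == '.') r'
              rw [hmm] at h2
              simpa using h2
            have htne : rec3 false (d :: ds) ≠ [] := by simp [rec3, hdne]
            have hml' : (d :: ds).length ≤ n := hmm ▸ hml
            have hmh' : (d :: ds).head? ≠ some '.' := by simpa using hdne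
            rw [delT_append_cons p _ htne,
                ← delL_of_head _ (rec3_head _ hmh'), ih _ hml']
            have hfilr : (spD (d :: ds)).filter (fun q => q ≠ []) =
                (spD r').filter (fun q => q ≠ []) := by
              rw [← spD_filter_dropWhile r', hmm]
            rw [hfilr]
            have hfne : (spD r').filter (fun q => q ≠ []) ≠ [] := by
              rw [← spD_filter_dropWhile r', hmm]
              exact filter_spD_cons_ne d ds hdne
            cases hf : (spD r').filter (fun q => q ≠ []) with
            | nil => exact absurd hf hfne
            | cons q qs =>
              simp only [List.filter_cons, hpne, ne_eq,
                PySem.Chars.join, hf]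
              simp [List.intercalate]

theorem getLast?_iff_suffix (t : List Char) (x : Char) :
    t.getLast? = some x ↔ [x] <:+ t := by
  constructor
  · intro h
    rcases List.eq_nil_or_concat t with rfl | ⟨u, y, rfl⟩
    · simp at h
    · simp at h
      subst h
      exact ⟨u, by simp⟩
  · rintro ⟨u, rfl⟩
    simp

theorem endswith_dot (t : List Char) :
    (PySem.Chars.endswith t ['.'] = true) ↔ t.getLast? = some '.' := by
  rw [PySem.Chars.endswith_iff, getLast?_iff_suffix]

theorem check_disjoint (c : Char) (h : c ∈ (['-', '_', '.'] : List Char)) :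
    PySem.Chars.isalpha c = false ∧ PySem.Chars.isdigit c = false := by
  fin_cases h <;> decide

theorem isIn_singleton (c : Char) :
    PySem.Chars.isIn [c] ['-', '_', '.'] = (['-', '_', '.'] : List Char).contains c := by
  by_cases hm : c ∈ (['-', '_', '.'] : List Char)
  · have h1 : PySem.Chars.isIn [c] ['-', '_', '.'] = true :=
      (PySem.Chars.isIn_iff_infix _ _).mpr ((List.singleton_infix_iff _ _).mpr hm)
    have h2 : (['-', '_', '.'] : List Char).contains c = true := by simpa using hm
    rw [h1, h2]
  · have h1 : PySem.Chars.isIn [c] ['-', '_', '.'] ≠ true := fun h =>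
      hm ((List.singleton_infix_iff _ _).mp ((PySem.Chars.isIn_iff_infix _ _).mp h))
    have h2 : (['-', '_', '.'] : List Char).contains c ≠ true := by simpa using hm
    simp only [Bool.not_eq_true] at h1 h2
    rw [h1, h2]

theorem step2_eq_filter (l : List Char) :
    (l.foldl (fun temp char =>
      let temp := if (['-', '_', '.'] : List Char).contains char then temp ++ [char] else temp
      if PySem.Chars.isalpha char || PySem.Chars.isdigit char then temp ++ [char] else temp) []) =
    l.filter (fun c => (['-', '_', '.'] : List Char).contains c ||
      (PySem.Chars.isalpha c || PySem.Chars.isdigit c)) := by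
  have hbody : (fun (temp : List Char) (char : Char) =>
      let temp := if (['-', '_', '.'] : List Char).contains char then temp ++ [char] else temp
      if PySem.Chars.isalpha char || PySem.Chars.isdigit char then temp ++ [char] else temp) =
      (fun (acc : List Char) (x : Char) =>
        if ((['-', '_', '.'] : List Char).contains x ||
          (PySem.Chars.isalpha x || PySem.Chars.isdigit x)) = true then acc ++ [id x] else acc) := by
    funext acc x
    by_cases hc : (['-', '_', '.'] : List Char).contains x = true
    · obtain ⟨ha, hd⟩ := check_disjoint x (by simpa using hc)
      simp [ha, hd]
    · have hx : ¬(x = '-' ∨ x = '_' ∨ x = '.') := by simpa using hc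
      simp [hx]
  rw [hbody, PySem.List.foldl_append_if]
  simp

theorem kept_eq_filter (l : List Char) :
    l.filter (fun c => PySem.Chars.isalnum c || PySem.Chars.isIn [c] ['-', '_', '.']) =
    l.filter (fun c => (['-', '_', '.'] : List Char).contains c ||
      (PySem.Chars.isalpha c || PySem.Chars.isdigit c)) := by
  apply List.filter_congr
  intro x _
  rw [PySem.Chars.isalnum, isIn_singleton, Bool.or_comm]

theorem padA_one (a : Char) : padA [a] = [a, a, a] := by
  unfold padA padA padA
  norm_num [List.getLast!]

theorem padA_two (a b : Char) : padA [a, b] = [a, b, b] := by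
  unfold padA padA
  norm_num [List.getLast!]

theorem slice_neg_one_eq (t : List Char) : PySem.List.slice t none (some (-1)) = t.dropLast := by
  simp [pysem]

theorem delL_eq (t : List Char) :
    (if t.length > 0 ∧ t.head? = some '.' then t.tail else t) = delL t := by
  unfold delL
  by_cases h : t.head? = some '.'
  · have : t.length > 0 := by cases t <;> simp_all
    simp [h, this]
  · simp [h]

theorem delT_eq (t : List Char) :
    (if t.length ≠ 0 ∧ t.getLast? = some '.' then t.dropLast else t) = delT t := by
  unfold delT
  by_cases h : t.getLast? = some '.'
  · have : t.length ≠ 0 := by cases t <;> simp_all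
    simp [h, this]
  · simp [h]

theorem A34_eq (k : List Char) :
    delT (delL (rec3 false k)) =
      PySem.Chars.join ['.'] ((PySem.Chars.splitOn k ['.']).filter (fun p => p ≠ [])) := by
  rw [main_lemma k.length k (le_refl _), splitOn_eq_spD]

theorem ports_eq (new_id : String) : solution new_id = solution_alt new_id := by
  unfold solution solution_alt
  have h00 : (decide ((0 : Int) ≠ 0)) = false := by decide
  simp only [step2_eq_filter, kept_eq_filter, foldl3_eq, h00, delL_eq, delT_eq, A34_eq,
    List.nil_append]
  set S := PySem.Chars.join ['.']
    ((PySem.Chars.splitOn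
        (List.filter (fun c => ['-', '_', '.'].contains c ||
          (PySem.Chars.isalpha c || PySem.Chars.isdigit c)) (PySem.Chars.lower new_id.toList))
        ['.']).filter (fun p => p ≠ [])) with hS
  clear hS
  clear_value S
  by_cases hSe : S = []
  · subst hSe
    norm_num [padA_one, List.getLast!, List.replicate]
  · have hlen0 : ¬(S.length = 0) := by simpa using hSe
    simp only [if_neg hlen0, if_neg hSe]
    by_cases h16 : S.length ≥ 16
    · simp only [if_pos h16, PySem.Chars.slice_eq_listSlice]
      by_cases hT : (PySem.List.slice S none (some 15)).getLast? = some '.'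
      · have hE : PySem.Chars.endswith (PySem.List.slice S none (some 15)) ['.'] = true :=
          (endswith_dot _).mpr hT
        simp only [if_pos hT, hE, if_pos, slice_neg_one_eq]
      · have hE : ¬(PySem.Chars.endswith (PySem.List.slice S none (some 15)) ['.'] = true) :=
          fun h => hT ((endswith_dot _).mp h)
        have hEf : PySem.Chars.endswith (PySem.List.slice S none (some 15)) ['.'] = false := by
          simpa using hE
        simp [hT, hEf]
    · simp only [if_neg h16]
      by_cases h3 : S.length < 3
      · simp only [if_pos h3]
        rcases S with _ | ⟨a, _ | ⟨b, _ | ⟨c', tl⟩⟩⟩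
        · exact absurd rfl hSe
        · norm_num [padA_one, List.getLast!, List.replicate]
        · norm_num [padA_two, List.getLast!, List.replicate]
        · simp at h3; omega
      · simp only [if_neg h3]

-- ===== VERDICT (by name: the statement is the Claim_ definition above) =====
theorem solution_spec : Claim_equal_solution := by
  intro new_id _
  show solution new_id = solution_alt new_id
  exact ports_eq new_id
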